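-- pv_equiv track=rewrite | github.com/bbl-dres/kennwerte-db | scripts/build_db.py | parse_flat_filename
-- ===== SOURCE A (Python) =====
-- SOURCES = {
--     "bbl": "Bundesamt fuer Bauten und Logistik (BBL)",
--     "armasuisse": "armasuisse Immobilien (VBS)",
--     "stadt-zuerich": "Stadt Zuerich, Hochbaudepartement",
-- }
--
-- CATEGORY_MAP = {
--     "ausland":       ("AUSL",   "BOTSCHAFT",    "Bauten im Ausland"),
--     "bildung":       ("FORSCH", "FORSCHUNG",    "Bildung und Forschung"),
--     "bundeshaus":    ("REPR",   "REGIERUNG",    "Bundeshaus"),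
--     "justiz":        ("GERICHT","GERICHT",      "Justiz und Polizei"),
--     "kultur":        ("KULT",   "MUSEUM",       "Kultur und Denkmaeler"),
--     "parkanlagen":   ("INFRA",  "HIST",         "Parkanlagen und Landwirtschaft"),
--     "produktion":    ("INFRA",  "WERKSTATT",    "Produktion und Lager"),
--     "sport":         ("SPORT",  "SPORT",        "Sport"),
--     "technik":       ("INFRA",  "VERW",         "Technische Anlagen"),
--     "verschiedenes": ("ALLG",   "VERW",         "Verschiedenes"),
--     "verwaltung":    ("ALLG",   "VERW",         "Verwaltung"),
--     "wohnen":        ("ALLG",   "WOHNEN",       "Wohnen"),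
--     "zoll":          ("ZOLL",   "ZOLLANLAGE",   "Zoll"),
--     "militaer":      ("VBS",    "KASERNE",      "armasuisse / VBS"),
--     "hochbau":       ("KOMMUN", "VERW",         "Stadt Zuerich"),
-- }
--
-- def parse_flat_filename(filename):
--     """Parse source and category from flat filename: source_category_rest.pdf"""
--     for src in sorted(SOURCES.keys(), key=len, reverse=True):
--         prefix = src + "_"
--         if filename.startswith(prefix):
--             rest = filename[len(prefix):]
--             for cat in sorted(CATEGORY_MAP.keys(), key=len, reverse=True):
--                 cat_prefix = cat + "_"
--                 if rest.startswith(cat_prefix):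
--                     original = rest[len(cat_prefix):]
--                     return src, cat, original
--     return None, None, filename
-- ===== SOURCE B (Python) =====
-- # B: one split('_', 2) tokenization plus two set-membership tests, instead of
-- # A's nested prefix-scanning loops over the length-sorted dict keys.
-- SOURCE_KEYS = {"bbl", "armasuisse", "stadt-zuerich"}
--
-- CATEGORY_KEYS = {
--     "ausland", "bildung", "bundeshaus", "justiz", "kultur", "parkanlagen",
--     "produktion", "sport", "technik", "verschiedenes", "verwaltung",
--     "wohnen", "zoll", "militaer", "hochbau",
-- }
--
-- def parse_flat_filename(filename):
--     """Parse source and category from flat filename: source_category_rest.pdf"""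
--     parts = filename.split("_", 2)
--     if len(parts) == 3 and parts[0] in SOURCE_KEYS and parts[1] in CATEGORY_KEYS:
--         return parts[0], parts[1], parts[2]
--     return None, None, filename
-- ===== Notes on version B (the rewrite author's own statement) =====
-- stated objective: simpler
-- what changed: Replaces the nested prefix-scanning loops over the two length-sorted key lists by a single maxsplit-2 tokenization at underscores followed by two set-membership tests on literal key sets.
import Mathlib
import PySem

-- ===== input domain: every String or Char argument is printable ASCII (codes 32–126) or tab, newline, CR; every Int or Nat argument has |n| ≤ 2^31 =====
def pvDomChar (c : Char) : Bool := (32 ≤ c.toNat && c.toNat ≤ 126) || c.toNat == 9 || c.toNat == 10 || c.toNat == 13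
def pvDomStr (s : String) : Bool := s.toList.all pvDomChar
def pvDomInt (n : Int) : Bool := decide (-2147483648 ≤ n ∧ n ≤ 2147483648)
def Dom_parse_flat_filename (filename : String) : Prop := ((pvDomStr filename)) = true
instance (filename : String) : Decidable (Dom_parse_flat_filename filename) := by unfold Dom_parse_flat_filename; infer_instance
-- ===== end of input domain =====

-- B replaces A's nested prefix-scanning loops over the two length-sorted key lists by one
-- maxsplit-2 tokenization at underscores plus two set-membership tests on literal key sets (objective: simpler).

-- ===== PORT A =====
def pvSOURCES : PySem.Dict String String := ⟨[
  ("bbl", "Bundesamt fuer Bauten und Logistik (BBL)"),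
  ("armasuisse", "armasuisse Immobilien (VBS)"),
  ("stadt-zuerich", "Stadt Zuerich, Hochbaudepartement")]⟩

def pvCATEGORY_MAP : PySem.Dict String (String × String × String) := ⟨[
  ("ausland",       ("AUSL",   "BOTSCHAFT",    "Bauten im Ausland")),
  ("bildung",       ("FORSCH", "FORSCHUNG",    "Bildung und Forschung")),
  ("bundeshaus",    ("REPR",   "REGIERUNG",    "Bundeshaus")),
  ("justiz",        ("GERICHT","GERICHT",      "Justiz und Polizei")),
  ("kultur",        ("KULT",   "MUSEUM",       "Kultur und Denkmaeler")),
  ("parkanlagen",   ("INFRA",  "HIST",         "Parkanlagen und Landwirtschaft")),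
  ("produktion",    ("INFRA",  "WERKSTATT",    "Produktion und Lager")),
  ("sport",         ("SPORT",  "SPORT",        "Sport")),
  ("technik",       ("INFRA",  "VERW",         "Technische Anlagen")),
  ("verschiedenes", ("ALLG",   "VERW",         "Verschiedenes")),
  ("verwaltung",    ("ALLG",   "VERW",         "Verwaltung")),
  ("wohnen",        ("ALLG",   "WOHNEN",       "Wohnen")),
  ("zoll",          ("ZOLL",   "ZOLLANLAGE",   "Zoll")),
  ("militaer",      ("VBS",    "KASERNE",      "armasuisse / VBS")),
  ("hochbau",       ("KOMMUN", "VERW",         "Stadt Zuerich"))]⟩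

-- inner loop of A: 'for cat in sorted(CATEGORY_MAP.keys(), key=len, reverse=True): …'
def pvCatLoop (rest : String) : List String → Option (String × String)
  | [] => none
  | cat :: cats =>
    let cat_prefix := cat ++ "_"
    if PySem.Str.startswith rest cat_prefix then
      some (cat, PySem.Str.slice rest (some (PySem.Str.len cat_prefix)) none)
    else pvCatLoop rest cats

-- outer loop of A: 'for src in sorted(SOURCES.keys(), key=len, reverse=True): …'
def pvSrcLoop (filename : String) (cats : List String) : List String → Option (String × String × String)
  | [] => none
  | src :: srcs =>
    let prefx := src ++ "_"
    if PySem.Str.startswith filename prefx then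
      let rest := PySem.Str.slice filename (some (PySem.Str.len prefx)) none
      match pvCatLoop rest cats with
      | some (cat, original) => some (src, cat, original)
      | none => pvSrcLoop filename cats srcs
    else pvSrcLoop filename cats srcs

def parse_flat_filename (filename : String) : Option String × Option String × String :=
  match pvSrcLoop filename
      (PySem.List.sorted pvCATEGORY_MAP.keys (fun k => PySem.Str.len k) true)
      (PySem.List.sorted pvSOURCES.keys (fun k => PySem.Str.len k) true) with
  | some (src, cat, original) => (some src, some cat, original)
  | none => (none, none, filename)

-- ===== PORT B =====
-- B's literal key sets (Source B's SOURCE_KEYS / CATEGORY_KEYS)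
def pvSourceKeys : PySem.Set String :=
  PySem.Set.ofList ["bbl", "armasuisse", "stadt-zuerich"]

def pvCategoryKeys : PySem.Set String :=
  PySem.Set.ofList ["ausland", "bildung", "bundeshaus", "justiz", "kultur", "parkanlagen",
    "produktion", "sport", "technik", "verschiedenes", "verwaltung",
    "wohnen", "zoll", "militaer", "hochbau"]

def parse_flat_filename_alt (filename : String) : Option String × Option String × String :=
  match PySem.Str.splitMax? filename "_" 2 with
  | some [p0, p1, p2] =>
    if PySem.Set.contains pvSourceKeys p0 && PySem.Set.contains pvCategoryKeys p1 then
      (some p0, some p1, p2)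
    else (none, none, filename)
  | _ => (none, none, filename)

-- ===== PRECONDITION & SPEC =====
def Spec_parse_flat_filename (filename : String) (out : Option String × Option String × String) : Prop := out = parse_flat_filename_alt filename
instance (filename : String) (out : Option String × Option String × String) : Decidable (Spec_parse_flat_filename filename out) := by unfold Spec_parse_flat_filename; infer_instance

-- ===== CLAIM (what is proved, stated in full; the proofs are below) =====
def Claim_equal_parse_flat_filename : Prop := ∀ (filename : String), Dom_parse_flat_filename filename → Spec_parse_flat_filename filename (parse_flat_filename filename)

-- ===== LEMMAS AND PROOFS =====

-- the first '_'-token of a character list, and what follows it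
def pvTok (cs : List Char) : List Char := cs.takeWhile (· != '_')
def pvRest (cs : List Char) : List Char := cs.dropWhile (· != '_')

-- reference shape of PySem.Chars.splitOnMax.go for sep = "_" (fuel removed)
def pvF : Nat → List Char → List Char → List (List Char) → List (List Char)
  | 0, l, cur, acc => ((cur.reverse ++ l) :: acc).reverse
  | (m+1), l, cur, acc =>
    match pvRest l with
    | [] => ((cur.reverse ++ l) :: acc).reverse
    | _ :: r => pvF m r [] ((cur.reverse ++ pvTok l) :: acc)

theorem pvTok_append_pvRest (cs : List Char) : pvTok cs ++ pvRest cs = cs := by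
  simp [pvTok, pvRest]

theorem pvRest_head (cs : List Char) {c : Char} {r : List Char}
    (h : pvRest cs = c :: r) : c = '_' := by
  induction cs with
  | nil => simp [pvRest] at h
  | cons c0 cs ih =>
    by_cases hc : c0 = '_'
    · subst hc; simp [pvRest] at h; exact h.1.symm
    · simp [pvRest, hc] at h ⊢; exact ih h

theorem pvF_cons (m : Nat) (c : Char) (rest cur : List Char) (acc : List (List Char))
    (hc : c ≠ '_') : pvF (m+1) (c :: rest) cur acc = pvF (m+1) rest (c :: cur) acc := by
  have hrest : pvRest (c :: rest) = pvRest rest := by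
    simp [pvRest, hc]
  have htok : pvTok (c :: rest) = c :: pvTok rest := by
    simp [pvTok, hc]
  cases h : pvRest rest with
  | nil => simp [pvF, hrest, h]
  | cons x r => simp [pvF, hrest, h, htok]

theorem pvGo_eq_pvF (fuel m : Nat) (l cur : List Char) (acc : List (List Char))
    (h : l.length < fuel) :
    PySem.Chars.splitOnMax.go ['_'] fuel m l cur acc = pvF m l cur acc := by
  induction fuel generalizing m l cur acc with
  | zero => omega
  | succ fuel ih =>
    cases l with
    | nil => cases m <;> simp [PySem.Chars.splitOnMax.go, pvF, pvRest]
    | cons c rest =>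
      cases m with
      | zero => simp [PySem.Chars.splitOnMax.go, pvF]
      | succ m =>
        by_cases hc : c = '_'
        · subst hc
          have : PySem.Chars.splitOnMax.go ['_'] (fuel+1) (m+1) ('_'::rest) cur acc
              = PySem.Chars.splitOnMax.go ['_'] fuel m rest [] (cur.reverse :: acc) := by
            simp [PySem.Chars.splitOnMax.go, List.isPrefixOf]
          rw [this, ih m rest [] (cur.reverse :: acc) (by simpa using Nat.lt_of_succ_lt_succ h)]
          simp [pvF, pvRest, pvTok]
        · have : PySem.Chars.splitOnMax.go ['_'] (fuel+1) (m+1) (c::rest) cur acc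
              = PySem.Chars.splitOnMax.go ['_'] fuel (m+1) rest (c :: cur) acc := by
            simp [PySem.Chars.splitOnMax.go, List.isPrefixOf, Ne.symm hc]
          rw [this, ih (m+1) rest (c::cur) acc (by simpa using Nat.lt_of_succ_lt_succ h)]
          exact (pvF_cons m c rest cur acc hc).symm

theorem pvSplit_eq (cs : List Char) :
    PySem.Chars.splitOnMax cs ['_'] 2 = pvF 2 cs [] [] := by
  have : ¬ ((2:Int) < 0) := by norm_num
  simp only [PySem.Chars.splitOnMax, this, if_false]
  exact pvGo_eq_pvF (cs.length + 1) 2 cs [] [] (by omega)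

theorem pvTok_concat (p t : List Char) (hp : ('_' : Char) ∉ p) :
    pvTok (p ++ '_' :: t) = p ∧ pvRest (p ++ '_' :: t) = '_' :: t := by
  induction p with
  | nil => simp [pvTok, pvRest]
  | cons a p ih =>
    have ha : a ≠ '_' := fun h => hp (by simp [h])
    have := ih (fun h => hp (by simp [h]))
    simp [pvTok, pvRest, ha] at this ⊢
    exact this

theorem pvPrefix_iff (cs p : List Char) (hp : ('_' : Char) ∉ p) :
    (p ++ ['_']) <+: cs ↔ pvTok cs = p ∧ pvRest cs ≠ [] := by
  constructor
  · rintro ⟨t, ht⟩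
    have hcs : cs = p ++ '_' :: t := by simpa using ht.symm
    obtain ⟨h1, h2⟩ := pvTok_concat p t hp
    rw [hcs]; simp [h1, h2]
  · rintro ⟨h1, h2⟩
    cases h : pvRest cs with
    | nil => exact absurd h h2
    | cons c r =>
      have hc := pvRest_head cs h
      refine ⟨r, ?_⟩
      have := pvTok_append_pvRest cs
      rw [h1, h, hc] at this
      simpa using this

-- the startswith test in char terms, for a '_'-free word w
theorem pvStarts (s : String) (w : String) (hw : ('_' : Char) ∉ w.toList) :
    PySem.Str.startswith s (w ++ "_") = true ↔ pvTok s.toList = w.toList ∧ pvRest s.toList ≠ [] := by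
  rw [PySem.Str.startswith_eq, PySem.Chars.startswith_iff]
  have : (w ++ "_").toList = w.toList ++ ['_'] := by simp
  rw [this, pvPrefix_iff s.toList w.toList hw]

-- the slice value when the prefix matches
theorem pvSliceVal (s : String) (w : String)
    (h1 : pvTok s.toList = w.toList) (h2 : pvRest s.toList ≠ []) :
    PySem.Str.slice s (some (PySem.Str.len (w ++ "_"))) none
      = String.ofList ((pvRest s.toList).tail) := by
  apply String.ext
  cases hr : pvRest s.toList with
  | nil => exact absurd hr h2
  | cons c r =>
    have hc := pvRest_head s.toList hr
    have hs : s.toList = w.toList ++ '_' :: r := by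
      have := pvTok_append_pvRest s.toList
      rw [h1, hr, hc] at this; exact this.symm
    have hlen : PySem.Str.len (w ++ "_") = ((w.toList.length + 1 : Nat) : Int) := by
      simp [PySem.Str.len]
    rw [PySem.Str.toList_slice, PySem.Chars.slice_eq_listSlice, hlen,
        PySem.List.slice_from_natCast, hs]
    rw [show (c :: r).tail = r from rfl,
        show w.toList.length + 1 = (w.toList ++ ['_']).length by simp,
        show w.toList ++ '_' :: r = (w.toList ++ ['_']) ++ r by simp,
        List.drop_left]
    simp

theorem pvCatLoop_eq (rest : String) (cats : List String)
    (h : ∀ c ∈ cats, ('_' : Char) ∉ c.toList) :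
    pvCatLoop rest cats =
      if pvRest rest.toList ≠ [] ∧ String.ofList (pvTok rest.toList) ∈ cats then
        some (String.ofList (pvTok rest.toList), String.ofList ((pvRest rest.toList).tail))
      else none := by
  induction cats with
  | nil => simp [pvCatLoop]
  | cons cat cats ih =>
    have hcat : ('_' : Char) ∉ cat.toList := h cat (by simp)
    have ih' := ih (fun c hc => h c (by simp [hc]))
    by_cases hs : PySem.Str.startswith rest (cat ++ "_") = true
    · obtain ⟨h1, h2⟩ := (pvStarts rest cat hcat).mp hs
      have hofl : String.ofList (pvTok rest.toList) = cat := String.ext (by simp [h1])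
      simp only [pvCatLoop, hs, if_true]
      rw [pvSliceVal rest cat h1 h2]
      simp [hofl, h2]
    · have hne : ¬ (pvTok rest.toList = cat.toList ∧ pvRest rest.toList ≠ []) := by
        intro hc; exact hs ((pvStarts rest cat hcat).mpr hc)
      have hfalse : PySem.Str.startswith rest (cat ++ "_") = false := by
        simpa using hs
      simp only [pvCatLoop, hfalse, Bool.false_eq_true, if_false]
      rw [ih']
      by_cases hr : pvRest rest.toList = []
      · simp [hr]
      · have hmem : String.ofList (pvTok rest.toList) ≠ cat := by
          intro he
          exact hne ⟨by rw [← he]; simp, hr⟩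
        simp [hr, List.mem_cons, hmem]

theorem pvSrcLoop_eq (f : String) (cats srcs : List String)
    (hs : ∀ s ∈ srcs, ('_' : Char) ∉ s.toList) :
    pvSrcLoop f cats srcs =
      if pvRest f.toList ≠ [] ∧ String.ofList (pvTok f.toList) ∈ srcs then
        (pvCatLoop (String.ofList ((pvRest f.toList).tail)) cats).map
          (fun p => (String.ofList (pvTok f.toList), p.1, p.2))
      else none := by
  induction srcs with
  | nil => simp [pvSrcLoop]
  | cons src srcs ih =>
    have hsrc : ('_' : Char) ∉ src.toList := hs src (by simp)
    have ih' := ih (fun s h => hs s (by simp [h]))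
    by_cases hst : PySem.Str.startswith f (src ++ "_") = true
    · obtain ⟨h1, h2⟩ := (pvStarts f src hsrc).mp hst
      have hofl : String.ofList (pvTok f.toList) = src := String.ext (by simp [h1])
      simp only [pvSrcLoop, hst, if_true]
      rw [pvSliceVal f src h1 h2]
      cases hcl : pvCatLoop (String.ofList ((pvRest f.toList).tail)) cats with
      | some p =>
        cases p with
        | mk c o => simp [hofl, h2]
      | none =>
        rw [ih']
        simp [hcl]
    · have hne : ¬ (pvTok f.toList = src.toList ∧ pvRest f.toList ≠ []) := by
        intro hc; exact hst ((pvStarts f src hsrc).mpr hc)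
      have hfalse : PySem.Str.startswith f (src ++ "_") = false := by
        simpa using hst
      simp only [pvSrcLoop, hfalse, Bool.false_eq_true, if_false]
      rw [ih']
      by_cases hr : pvRest f.toList = []
      · simp [hr]
      · have hmem : String.ofList (pvTok f.toList) ≠ src := by
          intro he
          exact hne ⟨by rw [← he]; simp, hr⟩
        simp [hr, List.mem_cons, hmem]

theorem pvSortedSrcs :
    PySem.List.sorted pvSOURCES.keys (fun k => PySem.Str.len k) true =
      ["stadt-zuerich", "armasuisse", "bbl"] := by decide

theorem pvSortedCats :
    PySem.List.sorted pvCATEGORY_MAP.keys (fun k => PySem.Str.len k) true =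
      ["verschiedenes", "parkanlagen", "bundeshaus", "produktion", "verwaltung",
       "militaer", "ausland", "bildung", "technik", "hochbau", "justiz", "kultur",
       "wohnen", "sport", "zoll"] := by decide

theorem pvMemSrc (x : String) :
    x ∈ pvSourceKeys ↔ x ∈ ["stadt-zuerich", "armasuisse", "bbl"] := by
  rw [pvSourceKeys, PySem.Set.mem_ofList]
  simp
  tauto

theorem pvMemCat (x : String) :
    x ∈ pvCategoryKeys ↔
      x ∈ ["verschiedenes", "parkanlagen", "bundeshaus", "produktion", "verwaltung",
           "militaer", "ausland", "bildung", "technik", "hochbau", "justiz", "kultur",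
           "wohnen", "sport", "zoll"] := by
  rw [pvCategoryKeys, PySem.Set.mem_ofList]
  simp
  tauto

-- B's split, characterised through pvF
theorem pvSplitMax (f : String) :
    PySem.Str.splitMax? f "_" 2 = some ((pvF 2 f.toList [] []).map String.ofList) := by
  have : ("_" : String).toList = ['_'] := by simp
  simp [PySem.Str.splitMax?, PySem.Chars.splitMax?, this, pvSplit_eq]

-- ===== VERDICT (by name: the statement is the Claim_ definition above) =====
theorem parse_flat_filename_spec : Claim_equal_parse_flat_filename := by
  intro f _
  unfold Spec_parse_flat_filename parse_flat_filename parse_flat_filename_alt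
  rw [pvSortedSrcs, pvSortedCats, pvSplitMax,
      pvSrcLoop_eq f _ _ (by decide)]
  cases hd : pvRest f.toList with
  | nil => simp [pvF, hd]
  | cons c r =>
    have hr : (pvRest f.toList).tail = r := by rw [hd]; rfl
    have hpvf : pvF 2 f.toList [] [] =
        match pvRest r with
        | [] => [pvTok f.toList, r]
        | _ :: r2 => [pvTok f.toList, pvTok r, r2] := by
      cases h2 : pvRest r <;> simp [pvF, hd, h2]
    rw [pvCatLoop_eq _ _ (by decide)]
    cases hd2 : pvRest r with
    | nil =>
      rw [hpvf]
      simp [hd2]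
    | cons c2 r2 =>
      rw [hpvf]
      simp only [hd2]
      by_cases hm1 : String.ofList (pvTok f.toList) ∈ ["stadt-zuerich", "armasuisse", "bbl"]
      · by_cases hm2 : String.ofList (pvTok r) ∈
            ["verschiedenes", "parkanlagen", "bundeshaus", "produktion", "verwaltung",
             "militaer", "ausland", "bildung", "technik", "hochbau", "justiz", "kultur",
             "wohnen", "sport", "zoll"]
        · simp [hd2, hm1, hm2, pvMemSrc, pvMemCat]
        · simp [hd2, hm1, hm2, pvMemSrc, pvMemCat]
      · simp [hm1, pvMemSrc, pvMemCat]
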